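-- pv_equiv track=rewrite | github.com/Scientialibera/HTML_TO_JSON | html_table_converter.py | _merge_header_rows
-- ===== SOURCE A (Python) =====
-- def _merge_header_rows(header_rows):
--     """
--     Merge multiple header rows into composite column names.
--     For example, ["Category", "Year1"] + ["", "1989"] -> "Category Year1 - 1989"
--     """
--     if len(header_rows) == 1:
--         return header_rows[0]
--
--     if len(header_rows) < 1:
--         return []
--
--     num_cols = max(len(row) for row in header_rows) if header_rows else 0
--     merged_headers = []
--
--     for col_idx in range(num_cols):
--         # Collect all non-empty values in this column across all header rows
--         col_values = []
--         for row_idx, row in enumerate(header_rows):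
--             if col_idx < len(row):
--                 val = str(row[col_idx]).strip()
--                 if val:  # Only add non-empty values
--                     col_values.append(val)
--
--         # Join them with " - " separator
--         merged_header = " - ".join(col_values) if col_values else ""
--         merged_headers.append(merged_header)
--
--     return merged_headers
-- ===== SOURCE B (Python) =====
-- def _merge_header_rows(header_rows):
--     """Row-major single pass: fold each header row into a running list of
--     merged column names, padding with "" and combining cell-wise."""
--     if len(header_rows) == 1:
--         return header_rows[0]
--     if len(header_rows) < 1:
--         return []
--     merged = []
--     for row in header_rows:
--         vals = [str(cell).strip() for cell in row]
--         if len(vals) < len(merged):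
--             vals = vals + [""] * (len(merged) - len(vals))
--         else:
--             merged = merged + [""] * (len(vals) - len(merged))
--         merged = [a + " - " + b if a and b else a + b for a, b in zip(merged, vals)]
--     return merged
-- ===== Notes on version B (the rewrite author's own statement) =====
-- stated objective: alternative
-- what changed: A builds each merged header column-by-column with an inner scan over all rows per column index; B makes a single row-major pass, folding each row into a running list of merged names by padding with empty strings and combining cell-wise, so no column indexing or per-column rescans remain.
import Mathlib
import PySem

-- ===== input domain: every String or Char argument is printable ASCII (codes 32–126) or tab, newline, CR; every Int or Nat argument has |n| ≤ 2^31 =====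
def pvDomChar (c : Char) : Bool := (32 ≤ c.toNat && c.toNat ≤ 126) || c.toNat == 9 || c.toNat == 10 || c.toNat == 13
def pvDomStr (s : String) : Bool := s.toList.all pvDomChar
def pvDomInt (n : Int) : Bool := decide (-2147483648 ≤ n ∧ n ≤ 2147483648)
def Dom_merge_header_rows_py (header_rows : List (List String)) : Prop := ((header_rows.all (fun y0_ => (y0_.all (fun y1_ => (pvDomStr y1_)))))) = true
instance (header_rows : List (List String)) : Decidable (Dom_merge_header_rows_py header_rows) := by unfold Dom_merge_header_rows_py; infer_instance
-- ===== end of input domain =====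

-- B replaces A's column-by-column construction (inner scan over all rows for each
-- column index) by a single row-major fold that keeps a running list of merged
-- names, padding with "" and combining cell-wise; same cost, different traversal.

-- ===== PORT A =====
def merge_header_rows_py (header_rows : List (List String)) : List String :=
  if header_rows.length = 1 then PySem.List.pyGetD header_rows 0 []
  else if header_rows.length < 1 then []
  else
    let num_cols : Int :=
      if header_rows ≠ [] then
        (PySem.List.max? (header_rows.map (fun row => (row.length : Int))) id).getD 0
      else 0
    (PySem.List.pyRange 0 num_cols 1).foldl (fun merged_headers col_idx =>
      let col_values := (PySem.List.enumerate header_rows).foldl (fun cv p =>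
        if col_idx < (p.2.length : Int) then
          let val := PySem.Str.strip (PySem.List.pyGetD p.2 col_idx "")
          if val ≠ "" then cv ++ [val] else cv
        else cv) []
      merged_headers ++
        [if col_values ≠ [] then PySem.Str.join " - " col_values else ""]) []

-- ===== PORT B =====
def pvCombine (a b : String) : String :=
  if a ≠ "" ∧ b ≠ "" then String.ofList (a.toList ++ " - ".toList ++ b.toList)
  else String.ofList (a.toList ++ b.toList)

def pvStep (merged : List String) (row : List String) : List String :=
  let vals := row.map PySem.Str.strip
  let vals' := if vals.length < merged.length then
      vals ++ List.replicate (merged.length - vals.length) "" else vals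
  let merged' := if vals.length < merged.length then merged
      else merged ++ List.replicate (vals.length - merged.length) ""
  List.zipWith pvCombine merged' vals'

def merge_header_rows_py_alt (header_rows : List (List String)) : List String :=
  if header_rows.length = 1 then PySem.List.pyGetD header_rows 0 []
  else if header_rows.length < 1 then []
  else header_rows.foldl pvStep []

-- ===== PRECONDITION & SPEC =====
def Spec_merge_header_rows_py (header_rows : List (List String)) (out : List String) : Prop := out = merge_header_rows_py_alt header_rows
instance (header_rows : List (List String)) (out : List String) : Decidable (Spec_merge_header_rows_py header_rows out) := by unfold Spec_merge_header_rows_py; infer_instance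

-- ===== CLAIM (what is proved, stated in full; the proofs are below) =====
def Claim_equal_merge_header_rows_py : Prop := ∀ (header_rows : List (List String)), Dom_merge_header_rows_py header_rows → Spec_merge_header_rows_py header_rows (merge_header_rows_py header_rows)

-- ===== LEMMAS AND PROOFS =====

/-- longest row length -/
def pvMaxLen (rows : List (List String)) : Nat :=
  rows.foldr (fun r m => max r.length m) 0

/-- the non-empty stripped entries of column `i`, top to bottom -/
def pvCol (rows : List (List String)) (i : Nat) : List String :=
  ((rows.filterMap (fun r => r[i]?)).map PySem.Str.strip).filter (fun v => v ≠ "")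

def pvJoin (xs : List String) : String := PySem.Str.join " - " xs

/-- the common specification both ports are reduced to -/
def pvSpec (rows : List (List String)) : List String :=
  (List.range (pvMaxLen rows)).map (fun i => pvJoin (pvCol rows i))

theorem pvMaxLen_le (rows : List (List String)) (r : List String) (h : r ∈ rows) :
    r.length ≤ pvMaxLen rows := by
  induction rows with
  | nil => cases h
  | cons a l ih =>
    simp only [pvMaxLen, List.foldr_cons]
    rcases List.mem_cons.mp h with h | h
    · subst h; exact le_max_left _ _
    · exact le_trans (ih h) (le_max_right _ _)

theorem pvMaxLen_mem (rows : List (List String)) (h : rows ≠ []) :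
    ∃ r ∈ rows, r.length = pvMaxLen rows := by
  induction rows with
  | nil => simp at h
  | cons a l ih =>
    by_cases hl : l = []
    · subst hl; exact ⟨a, by simp [pvMaxLen]⟩
    · obtain ⟨r, hr, hlen⟩ := ih hl
      simp only [pvMaxLen, List.foldr_cons]
      rcases le_total a.length (pvMaxLen l) with hle | hle
      · refine ⟨r, by simp [hr], ?_⟩
        simp only [pvMaxLen] at hlen hle ⊢; omega
      · refine ⟨a, by simp, ?_⟩
        simp only [pvMaxLen] at hlen hle ⊢; omega

theorem pvCol_nil_of_ge (rows : List (List String)) (i : Nat)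
    (h : pvMaxLen rows ≤ i) : pvCol rows i = [] := by
  induction rows with
  | nil => simp [pvCol]
  | cons a l ih =>
    simp only [pvMaxLen, List.foldr_cons] at h
    have h1 : a.length ≤ i := by omega
    have h2 : pvCol l i = [] := ih (by simp only [pvMaxLen]; omega)
    simp only [pvCol, List.filterMap_cons] at h2 ⊢
    rw [List.getElem?_eq_none (by omega)]
    exact h2

theorem pvCol_append (rows rows' : List (List String)) (i : Nat) :
    pvCol (rows ++ rows') i = pvCol rows i ++ pvCol rows' i := by
  simp [pvCol, List.filterMap_append]

theorem pvCol_mem_ne (rows : List (List String)) (i : Nat) (v : String)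
    (h : v ∈ pvCol rows i) : v ≠ "" := by
  have := List.of_mem_filter h
  simpa using this

theorem pvOfToList (s : String) : String.ofList s.toList = s := by simp

theorem pvJoin_nil : pvJoin [] = "" := by
  simp [pvJoin, PySem.Str.join, PySem.Chars.join, List.intercalate]

theorem charsJoin_ne_nil (sep : List Char) (ps : List (List Char)) (hx : ps ≠ [])
    (h : ∀ p ∈ ps, p ≠ []) : PySem.Chars.join sep ps ≠ [] := by
  induction ps with
  | nil => simp at hx
  | cons p qs ih =>
    cases qs with
    | nil => simpa [PySem.Chars.join_singleton] using h p (by simp)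
    | cons q rest =>
      rw [PySem.Chars.join_cons_cons]
      have : p ≠ [] := h p (by simp)
      simp [this]

theorem pvJoin_ne_empty (xs : List String) (hx : xs ≠ [])
    (h : ∀ v ∈ xs, v ≠ "") : pvJoin xs ≠ "" := by
  intro hc
  have ht : (pvJoin xs).toList = [] := by rw [hc]; rfl
  rw [pvJoin, PySem.Str.toList_join] at ht
  refine charsJoin_ne_nil _ _ (by simpa using hx) ?_ ht
  intro p hp
  obtain ⟨v, hv, rfl⟩ := List.mem_map.mp hp
  intro h0
  have := congrArg String.ofList h0
  rw [pvOfToList] at this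
  exact h v hv (by simpa using this)

theorem charsJoin_append_singleton (sep : List Char) (ps : List (List Char))
    (q : List Char) (hx : ps ≠ []) :
    PySem.Chars.join sep (ps ++ [q]) = PySem.Chars.join sep ps ++ sep ++ q := by
  induction ps with
  | nil => simp at hx
  | cons p rest ih =>
    cases rest with
    | nil => simp [PySem.Chars.join_cons_cons, PySem.Chars.join_singleton]
    | cons r rest' =>
      simp only [List.cons_append]
      rw [PySem.Chars.join_cons_cons, PySem.Chars.join_cons_cons]
      rw [← List.cons_append, ih (by simp)]
      simp

theorem pvJoin_append_singleton (xs : List String) (v : String) (hx : xs ≠ []) :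
    pvJoin (xs ++ [v]) =
      String.ofList ((pvJoin xs).toList ++ " - ".toList ++ v.toList) := by
  rw [← pvOfToList (pvJoin (xs ++ [v]))]
  congr 1
  rw [pvJoin, pvJoin, PySem.Str.toList_join, PySem.Str.toList_join, List.map_append,
    List.map_singleton, charsJoin_append_singleton _ _ _ (by simpa using hx)]

theorem pvCombine_join (xs : List String) (v : String) (h : ∀ w ∈ xs, w ≠ "") :
    pvCombine (pvJoin xs) v = pvJoin (xs ++ (if v ≠ "" then [v] else [])) := by
  by_cases hv : v = ""
  · subst hv
    rw [pvCombine, if_neg (by simp)]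
    simp
  · by_cases hx : xs = []
    · subst hx
      have hj : pvJoin [v] = v := by
        calc pvJoin [v] = String.ofList ((pvJoin [v]).toList) := (pvOfToList _).symm
          _ = String.ofList v.toList := by
              rw [pvJoin, PySem.Str.toList_join]
              simp [PySem.Chars.join_singleton]
          _ = v := pvOfToList v
      rw [pvJoin_nil, if_pos hv, pvCombine, if_neg (by simp), List.nil_append, hj]
      have : ("" : String).toList = [] := rfl
      rw [this, List.nil_append, pvOfToList]
    · rw [pvCombine, if_pos ⟨pvJoin_ne_empty xs hx h, hv⟩, if_pos hv,
        pvJoin_append_singleton xs v hx]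

-- ===== A side =====

theorem innerFold_eq_col (rows : List (List String)) (i : Nat) (s : Int) (cv : List String) :
    (PySem.List.enumerate rows s).foldl (fun cv p =>
        if (i : Int) < (p.2.length : Int) then
          let val := PySem.Str.strip (PySem.List.pyGetD p.2 (i : Int) "")
          if val ≠ "" then cv ++ [val] else cv
        else cv) cv = cv ++ pvCol rows i := by
  induction rows generalizing s cv with
  | nil => simp [pvCol]
  | cons r rows ih =>
    rw [PySem.List.enumerate_cons, List.foldl_cons]
    by_cases hi : i < r.length
    · have hcast : (i : Int) < (r.length : Int) := by exact_mod_cast hi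
      have hget : PySem.List.pyGetD r (i : Int) "" = r[i] := by
        rw [PySem.List.pyGetD_natCast, List.getD_eq_getElem r "" hi]
      rw [if_pos hcast, hget]
      have hcol : pvCol (r :: rows) i =
          (if PySem.Str.strip r[i] ≠ "" then [PySem.Str.strip r[i]] else []) ++ pvCol rows i := by
        simp only [pvCol, List.filterMap_cons, List.getElem?_eq_getElem hi]
        split_ifs with hne <;> simp [hne]
      rw [hcol]
      by_cases hne : PySem.Str.strip r[i] ≠ ""
      · rw [if_pos hne, if_pos hne, ih, List.append_assoc]
      · rw [if_neg hne, if_neg hne, ih, List.nil_append]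
    · have hcast : ¬ (i : Int) < (r.length : Int) := by exact_mod_cast hi
      have hcol : pvCol (r :: rows) i = pvCol rows i := by
        simp only [pvCol, List.filterMap_cons, List.getElem?_eq_none (by omega : r.length ≤ i)]
      rw [if_neg hcast, ih, hcol]

theorem portA_eq_spec (rows : List (List String)) (h : 2 ≤ rows.length) :
    merge_header_rows_py rows = pvSpec rows := by
  have hne : rows ≠ [] := by intro hh; subst hh; simp at h
  rw [merge_header_rows_py, if_neg (by omega), if_neg (by omega)]
  -- note: h : 2 ≤ rows.length
  simp only [if_pos hne]
  have hnum : (PySem.List.max? (rows.map (fun row => (row.length : Int))) id).getD 0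
      = (pvMaxLen rows : Int) := by
    obtain ⟨m, hm⟩ : ∃ m, PySem.List.max? (rows.map (fun row => (row.length : Int))) id = some m := by
      cases hmm : PySem.List.max? (rows.map (fun row => (row.length : Int))) id with
      | none => exact absurd (by simpa using (PySem.List.max?_eq_none_iff _ _).mp hmm) hne
      | some m => exact ⟨m, rfl⟩
    rw [hm, Option.getD_some]
    obtain ⟨r, hr, hrlen⟩ := List.mem_map.mp (PySem.List.max?_mem hm)
    obtain ⟨r', hr', hlen'⟩ := pvMaxLen_mem rows hne
    have h1 : m ≤ (pvMaxLen rows : Int) := by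
      rw [← hrlen]; exact_mod_cast pvMaxLen_le rows r hr
    have h2 : (pvMaxLen rows : Int) ≤ m := by
      have := PySem.List.max?_isMax hm ((r'.length : Int))
        (List.mem_map.mpr ⟨r', hr', rfl⟩)
      simpa [hlen'] using this
    omega
  rw [hnum, PySem.List.pyRange_one]
  have htn : ((pvMaxLen rows : Int) - 0).toNat = pvMaxLen rows := by omega
  rw [htn, List.foldl_map, pvSpec]
  have := PySem.List.foldl_append_singleton_eq_map
    (fun k : Nat =>
      let col_values := (PySem.List.enumerate rows 0).foldl (fun cv p =>
        if ((0 : Int) + (k : Int)) < (p.2.length : Int) then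
          let val := PySem.Str.strip (PySem.List.pyGetD p.2 ((0 : Int) + (k : Int)) "")
          if val ≠ "" then cv ++ [val] else cv
        else cv) []
      if col_values ≠ [] then PySem.Str.join " - " col_values else "")
    (List.range (pvMaxLen rows)) []
  rw [this, List.nil_append]
  refine List.map_congr_left (fun k _ => ?_)
  have hz : ((0 : Int) + (k : Int)) = (k : Int) := by omega
  simp only [hz]
  rw [innerFold_eq_col rows k 0 [], List.nil_append]
  by_cases hc : pvCol rows k = []
  · rw [if_neg (by simpa using hc), hc, pvJoin_nil]
  · rw [if_pos hc, pvJoin]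

-- ===== B side =====

theorem pvStep_eq (m r : List String) :
    pvStep m r =
      List.zipWith pvCombine
        (m ++ List.replicate (max m.length r.length - m.length) "")
        ((r.map PySem.Str.strip) ++ List.replicate (max m.length r.length - r.length) "") := by
  rw [pvStep]
  simp only [List.length_map]
  split_ifs with hlt
  · have h1 : max m.length r.length = m.length := Nat.max_eq_left (by omega)
    rw [h1, Nat.sub_self, List.replicate_zero, List.append_nil]
  · have h1 : max m.length r.length = r.length := Nat.max_eq_right (by omega)
    rw [h1, Nat.sub_self, List.replicate_zero, List.append_nil]

theorem pvStep_spec (rows : List (List String)) (r : List String) :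
    pvStep (pvSpec rows) r = pvSpec (rows ++ [r]) := by
  have hml : (pvSpec rows).length = pvMaxLen rows := by simp [pvSpec]
  have hmax : pvMaxLen (rows ++ [r]) = max (pvMaxLen rows) r.length := by
    have key : ∀ (l : List (List String)) (b : Nat),
        l.foldr (fun r m => max r.length m) b = max (pvMaxLen l) b := by
      intro l
      induction l with
      | nil => intro b; simp [pvMaxLen]
      | cons a t ih =>
        intro b
        simp only [pvMaxLen, List.foldr_cons] at ih ⊢
        rw [ih b]
        have := ih 0
        omega
    have hfold : pvMaxLen (rows ++ [r]) =
        rows.foldr (fun r m => max r.length m) (max r.length 0) := by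
      simp [pvMaxLen, List.foldr_append]
    rw [hfold, key]
    omega
  rw [pvStep_eq, hml]
  set M := pvMaxLen rows with hM
  set N := max M r.length with hN
  apply List.ext_getElem
  · simp [pvSpec, hmax]
    omega
  · intro i hi1 hi2
    have hiN : i < N := by
      simp only [List.length_zipWith, List.length_append, List.length_replicate,
        List.length_map, hml] at hi1
      omega
    have hlen1 : i < (pvSpec rows ++ List.replicate (N - M) "").length := by
      simp only [List.length_append, List.length_replicate, hml]
      omega
    have hlen2 : i < ((r.map PySem.Str.strip) ++ List.replicate (N - r.length) "").length := by
      simp only [List.length_append, List.length_replicate, List.length_map]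
      omega
    have hleft : (pvSpec rows ++ List.replicate (N - M) "")[i]'hlen1 = pvJoin (pvCol rows i) := by
      by_cases him : i < M
      · rw [List.getElem_append_left (by omega : i < (pvSpec rows).length)]
        simp [pvSpec]
      · rw [List.getElem_append_right (by omega : (pvSpec rows).length ≤ i)]
        rw [List.getElem_replicate]
        rw [pvCol_nil_of_ge rows i (by omega), pvJoin_nil]
    have hright : ((r.map PySem.Str.strip) ++ List.replicate (N - r.length) "")[i]'hlen2
        = if hr : i < r.length then PySem.Str.strip r[i] else "" := by
      by_cases hir : i < r.length
      · rw [dif_pos hir, List.getElem_append_left (by simpa using hir)]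
        simp
      · rw [dif_neg hir, List.getElem_append_right (by simpa using (by omega : r.length ≤ i))]
        exact List.getElem_replicate ..
    simp only [List.getElem_zipWith]
    rw [hleft, hright]
    have hrcol : pvCol (rows ++ [r]) i =
        pvCol rows i ++ (if (if hr : i < r.length then PySem.Str.strip r[i] else "") ≠ ""
          then [if hr : i < r.length then PySem.Str.strip r[i] else ""] else []) := by
      rw [pvCol_append]
      congr 1
      by_cases hir : i < r.length
      · simp only [dif_pos hir, pvCol, List.filterMap_cons, List.filterMap_nil,
          List.getElem?_eq_getElem hir]
        split_ifs with hne <;> simp_all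
      · simp only [dif_neg hir, pvCol, List.filterMap_cons, List.filterMap_nil,
          List.getElem?_eq_none (by omega : r.length ≤ i)]
        simp
    have hgoal : (pvSpec (rows ++ [r]))[i]'hi2 = pvJoin (pvCol (rows ++ [r]) i) := by
      simp [pvSpec]
    rw [hgoal, hrcol, pvCombine_join _ _ (fun w hw => pvCol_mem_ne rows i w hw)]

theorem foldB_eq_spec (rows : List (List String)) :
    rows.foldl pvStep [] = pvSpec rows := by
  induction rows using List.reverseRecOn with
  | nil => simp [pvSpec, pvMaxLen]
  | append_singleton l r ih => rw [List.foldl_append]; simp [ih, pvStep_spec]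

-- ===== VERDICT (by name: the statement is the Claim_ definition above) =====
theorem merge_header_rows_py_spec : Claim_equal_merge_header_rows_py := by
  intro rows _
  unfold Spec_merge_header_rows_py
  by_cases h1 : rows.length = 1
  · simp [merge_header_rows_py, merge_header_rows_py_alt, h1]
  · by_cases h0 : rows.length < 1
    · simp [merge_header_rows_py, merge_header_rows_py_alt, h1, h0]
    · have h2 : 2 ≤ rows.length := by omega
      rw [merge_header_rows_py_alt, if_neg h1, if_neg h0, foldB_eq_spec,
        portA_eq_spec rows h2]
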